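-- pv_equiv track=rewrite | github.com/PLSE-Lab/Python-MLAPI-expl | python_sources/week3prack2.py | example5
-- ===== SOURCE A (Python) =====
-- def example5(a, b):  # assume that A and B have equal length
--     """Return the number of elements in B equal to the sum of prefix sums in A."""
--     n = len(a)
--     count = 0
--     for i in range(n):  # loop from 0 to n-1
--         total = 0
--         for j in range(n):  # loop from 0 to n-1
--             for k in range(1 + j):  # loop from 0 to j
--                 total += a[k]
--                 if b[i] == total:
--                     count += 1
--                     return count
-- ===== SOURCE B (Python) =====
-- def example5(a, b):
--     """Return the number of elements in B equal to the sum of prefix sums in A."""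
--     n = len(a)
--     sums = set()
--     total = 0
--     for j in range(n):
--         for k in range(1 + j):
--             total += a[k]
--             sums.add(total)
--     for i in range(n):
--         if b[i] in sums:
--             return 1
-- ===== Notes on version B (the rewrite author's own statement) =====
-- stated objective: faster
-- what changed: B builds the set of flattened prefix-sum totals once (O(n^2)) and then membership-tests each b[i], instead of A's per-i recomputation of the whole total sequence (O(n^3)).
-- outside the precondition, e.g. on example5([1, 2], [1]): A returns 1, B returns 1
import Mathlib
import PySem

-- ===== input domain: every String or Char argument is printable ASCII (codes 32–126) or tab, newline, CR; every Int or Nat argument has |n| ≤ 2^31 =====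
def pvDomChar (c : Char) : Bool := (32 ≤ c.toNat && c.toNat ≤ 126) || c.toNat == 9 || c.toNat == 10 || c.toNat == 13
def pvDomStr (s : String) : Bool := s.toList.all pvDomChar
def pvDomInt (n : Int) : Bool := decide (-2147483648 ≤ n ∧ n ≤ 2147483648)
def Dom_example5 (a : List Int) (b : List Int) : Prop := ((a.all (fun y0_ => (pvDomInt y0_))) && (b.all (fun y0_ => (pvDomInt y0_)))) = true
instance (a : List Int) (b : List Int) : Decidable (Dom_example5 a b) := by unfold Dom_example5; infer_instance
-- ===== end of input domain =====

-- B builds the set of flattened prefix-sum totals once and membership-tests each b[i],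
-- replacing A's per-i recomputation of the whole total sequence (objective: faster, O(n^2) vs O(n^3)).

-- ===== PORT A =====
-- innermost loop: for k in range(1+j): total += a[k]; if b[i] == total: count += 1; return count
def exK (a b : List Int) (i : Nat) (count : Int) : List Nat → Int → Sum Int (Option Int)
  | [], total => .inl total
  | k :: ks, total =>
    match PySem.List.pyGet? a (k : Int) with
    | none => .inr none        -- IndexError (unreachable: k < len(a)); outside the claim
    | some ak =>
      let total' := total + ak
      match PySem.List.pyGet? b (i : Int) with
      | none => .inr none      -- IndexError: excluded by Pre_example5
      | some bi => if bi = total' then .inr (some (count + 1)) else exK a b i count ks total'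

-- middle loop: for j in range(n)
def exJ (a b : List Int) (i : Nat) (count : Int) : List Nat → Int → Option (Option Int)
  | [], _ => none
  | j :: js, total =>
    match exK a b i count (List.range (1 + j)) total with
    | .inl total' => exJ a b i count js total'
    | .inr r => some r

-- outer loop: for i in range(n); falling off the end returns None
def exI (a b : List Int) (count : Int) : List Nat → Option Int
  | [] => none
  | i :: is =>
    match exJ a b i count (List.range a.length) 0 with
    | some r => r
    | none => exI a b count is

def example5 (a : List Int) (b : List Int) : Option Int :=
  exI a b 0 (List.range a.length)

-- ===== PORT B =====
-- building the set: for k in range(1+j): total += a[k]; sums.add(total)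
def altK (a : List Int) : List Nat → Int → PySem.Set Int → Int × PySem.Set Int
  | [], total, s => (total, s)
  | k :: ks, total, s =>
    match PySem.List.pyGet? a (k : Int) with
    | none => (total, s)       -- unreachable: k < len(a)
    | some ak => altK a ks (total + ak) (PySem.Set.add s (total + ak))

def altJ (a : List Int) : List Nat → Int → PySem.Set Int → Int × PySem.Set Int
  | [], total, s => (total, s)
  | j :: js, total, s =>
    match altK a (List.range (1 + j)) total s with
    | (total', s') => altJ a js total' s'

-- second loop: for i in range(n): if b[i] in sums: return 1
def altScan (b : List Int) (s : PySem.Set Int) : List Nat → Option Int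
  | [] => none
  | i :: is =>
    match PySem.List.pyGet? b (i : Int) with
    | none => none             -- IndexError: excluded by Pre_example5
    | some bi => if PySem.Set.contains s bi then some 1 else altScan b s is

def example5_alt (a : List Int) (b : List Int) : Option Int :=
  let st := altJ a (List.range a.length) 0 PySem.Set.empty
  altScan b st.2 (List.range a.length)

-- ===== PRECONDITION & SPEC =====
-- Pre_ excludes inputs with len(b) < len(a): on those A (and B alike) raises IndexError
-- reading b[i], unless an early element of b matches a partial sum — on those early-match
-- inputs both programs return the same value 1 anyway (Pre_ is narrower than the raise set).
def Pre_example5 (a : List Int) (b : List Int) : Prop := a.length ≤ b.length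
instance (a : List Int) (b : List Int) : Decidable (Pre_example5 a b) := by unfold Pre_example5; infer_instance
def pvWitness_example5 : List Int × List Int := ([1, 2], [3, 9])
def Spec_example5 (a : List Int) (b : List Int) (out : Option Int) : Prop := out = example5_alt a b
instance (a : List Int) (b : List Int) (out : Option Int) : Decidable (Spec_example5 a b out) := by unfold Spec_example5; infer_instance

-- ===== CLAIM (what is proved, stated in full; the proofs are below) =====
def Claim_equal_example5 : Prop := ∀ (a : List Int) (b : List Int), Dom_example5 a b → Pre_example5 a b → Spec_example5 a b (example5 a b)

-- ===== LEMMAS AND PROOFS =====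

-- totals visited by the k-loop starting at t (indices assumed in range)
def vis (a : List Int) : List Nat → Int → List Int
  | [], _ => []
  | k :: ks, t => (t + (a[k]?).getD 0) :: vis a ks (t + (a[k]?).getD 0)

-- totals visited across the j-loop
def visJ (a : List Int) : List Nat → Int → List Int
  | [], _ => []
  | j :: js, t =>
      vis a (List.range (1 + j)) t ++ visJ a js (t + ((List.range (1 + j)).map (fun k => (a[k]?).getD 0)).sum)

lemma exK_eq (a b : List Int) (i : Nat) (bi : Int)
    (hbi : PySem.List.pyGet? b (i : Int) = some bi) (ks : List Nat)
    (hk : ∀ k ∈ ks, k < a.length) (t : Int) :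
    exK a b i 0 ks t =
      if bi ∈ vis a ks t then .inr (some 1)
      else .inl (t + (ks.map (fun k => (a[k]?).getD 0)).sum) := by
  induction ks generalizing t with
  | nil => simp [exK, vis]
  | cons k ks ih =>
    have hka : k < a.length := hk k (by simp)
    have hgk : a[k] = (a[k]?).getD 0 := by simp [List.getElem?_eq_getElem hka]
    simp only [exK, hbi, PySem.List.pyGet?_natCast, List.getElem?_eq_getElem hka]
    rw [hgk]
    simp only [vis, List.mem_cons, List.map_cons, List.sum_cons]
    by_cases h : bi = t + (a[k]?).getD 0
    · simp [h]
    · rw [if_neg h, ih (fun k hk' => hk k (by simp [hk'])) (t + (a[k]?).getD 0)]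
      by_cases h2 : bi ∈ vis a ks (t + (a[k]?).getD 0)
      · simp [h2]
      · simp [h, h2, add_assoc]

lemma exJ_eq (a b : List Int) (i : Nat) (bi : Int)
    (hbi : PySem.List.pyGet? b (i : Int) = some bi) (js : List Nat)
    (hj : ∀ j ∈ js, j < a.length) (t : Int) :
    exJ a b i 0 js t =
      if bi ∈ visJ a js t then some (some 1) else none := by
  induction js generalizing t with
  | nil => simp [exJ, visJ]
  | cons j js ih =>
    have hk : ∀ k ∈ List.range (1 + j), k < a.length := by
      intro k hkm
      have := List.mem_range.mp hkm
      have := hj j (by simp)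
      omega
    simp only [exJ, exK_eq a b i bi hbi _ hk, visJ, List.mem_append]
    by_cases h : bi ∈ vis a (List.range (1 + j)) t
    · simp [h]
    · simp only [if_neg h]
      rw [ih (fun j' hj' => hj j' (by simp [hj']))]
      by_cases h2 : bi ∈ visJ a js (t + ((List.range (1 + j)).map (fun k => (a[k]?).getD 0)).sum)
      · simp [h, h2]
      · simp [h, h2]

lemma altK_eq (a : List Int) (ks : List Nat) (hk : ∀ k ∈ ks, k < a.length)
    (t : Int) (s : PySem.Set Int) :
    altK a ks t s = (t + (ks.map (fun k => (a[k]?).getD 0)).sum, (vis a ks t).foldl PySem.Set.add s) := by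
  induction ks generalizing t s with
  | nil => simp [altK, vis]
  | cons k ks ih =>
    have hka : k < a.length := hk k (by simp)
    have hgk : a[k] = (a[k]?).getD 0 := by simp [List.getElem?_eq_getElem hka]
    simp only [altK, PySem.List.pyGet?_natCast, List.getElem?_eq_getElem hka]
    rw [hgk]
    simp only [vis, List.map_cons, List.sum_cons, List.foldl_cons]
    rw [ih (fun k hk' => hk k (by simp [hk']))]
    simp [add_assoc]

lemma altJ_eq (a : List Int) (js : List Nat) (hj : ∀ j ∈ js, j < a.length)
    (t : Int) (s : PySem.Set Int) :
    (altJ a js t s).2 = (visJ a js t).foldl PySem.Set.add s := by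
  induction js generalizing t s with
  | nil => simp [altJ, visJ]
  | cons j js ih =>
    have hk : ∀ k ∈ List.range (1 + j), k < a.length := by
      intro k hkm
      have := List.mem_range.mp hkm
      have := hj j (by simp)
      omega
    simp only [altJ, altK_eq a _ hk, visJ, List.foldl_append]
    exact ih (fun j' hj' => hj j' (by simp [hj'])) _ _

lemma mem_foldl_add (xs : List Int) (s : PySem.Set Int) (x : Int) :
    x ∈ xs.foldl PySem.Set.add s ↔ x ∈ s ∨ x ∈ xs := by
  induction xs generalizing s with
  | nil => simp
  | cons y ys ih => simp [ih, PySem.Set.mem_add, List.mem_cons, or_assoc]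

lemma exI_eq_altScan (a b : List Int) (S : List Int)
    (hS : ∀ x, PySem.Set.contains S x = decide (x ∈ visJ a (List.range a.length) 0))
    (hab : a.length ≤ b.length) (is : List Nat) (hi : ∀ i ∈ is, i < a.length) :
    exI a b 0 is = altScan b S is := by
  induction is with
  | nil => rfl
  | cons i is ih =>
    have hia : i < a.length := hi i (by simp)
    have hibn : i < b.length := Nat.lt_of_lt_of_le hia hab
    have hbi : PySem.List.pyGet? b (i : Int) = some b[i] := by
      rw [PySem.List.pyGet?_natCast, List.getElem?_eq_getElem hibn]
    have hj : ∀ j ∈ List.range a.length, j < a.length := fun j hj => List.mem_range.mp hj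
    simp only [exI, altScan, exJ_eq a b i b[i] hbi _ hj, hbi, hS]
    by_cases h : b[i] ∈ visJ a (List.range a.length) 0
    · simp [h]
    · simp only [h, decide_false, Bool.false_eq_true, if_false]
      exact ih (fun i' hi' => hi i' (by simp [hi']))

-- ===== VERDICT (by name: the statement is the Claim_ definition above) =====
theorem example5_spec : Claim_equal_example5 := by
  intro a b _ hpre
  show example5 a b = example5_alt a b
  unfold example5 example5_alt
  have hj : ∀ j ∈ List.range a.length, j < a.length := fun j hj => List.mem_range.mp hj
  apply exI_eq_altScan a b _ _ hpre _ (fun i hi => List.mem_range.mp hi)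
  intro x
  rw [altJ_eq a _ hj]
  simp [mem_foldl_add, PySem.Set.contains, PySem.Set.empty]
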